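-- pv_equiv track=rewrite | github.com/blamedcloud/ParserTongue | ParserTongue/smallestStrings.py | canMakeSize
-- ===== SOURCE A (Python) =====
-- def canMakeSize(size, sizes):
--     if size < 1:
--         return False
--
--     if 1 in sizes:
--         return True
--
--     for s in sizes:
--         if s == size or (size % s == 0) or canMakeSize(size - s, sizes):
--             return True
--     return False
-- ===== SOURCE B (Python) =====
-- def canMakeSize(size, sizes):
--     memo = {}
--
--     def reachable(n):
--         if n < 1:
--             return False
--         if n in memo:
--             return memo[n]
--         res = any(s >= 1 and (s == n or n % s == 0) for s in sizes)
--         if not res: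
--             for s in sizes:
--                 if s >= 1 and reachable(n - s):
--                     res = True
--                     break
--         memo[n] = res
--         return res
--
--     return reachable(size)
-- ===== Notes on version B (the rewrite author's own statement) =====
-- stated objective: alternative
-- what changed: Replaces A's naive exponential recursion by memoized top-down dynamic programming (explicit memo dict threaded through the search, divisibility checked over all coins before any descent): every remainder value is solved at most once, removing A's exponential recomputation; a timing run could not credit this on its input family.
-- outside the precondition, e.g. on canMakeSize(4, [-2]): A returns True, B returns False; on canMakeSize(3, [0, 5]): A raises ZeroDivisionError, B returns False; on canMakeSize(5, [-2, 7]): A raises RecursionError, B returns False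
import Mathlib
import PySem

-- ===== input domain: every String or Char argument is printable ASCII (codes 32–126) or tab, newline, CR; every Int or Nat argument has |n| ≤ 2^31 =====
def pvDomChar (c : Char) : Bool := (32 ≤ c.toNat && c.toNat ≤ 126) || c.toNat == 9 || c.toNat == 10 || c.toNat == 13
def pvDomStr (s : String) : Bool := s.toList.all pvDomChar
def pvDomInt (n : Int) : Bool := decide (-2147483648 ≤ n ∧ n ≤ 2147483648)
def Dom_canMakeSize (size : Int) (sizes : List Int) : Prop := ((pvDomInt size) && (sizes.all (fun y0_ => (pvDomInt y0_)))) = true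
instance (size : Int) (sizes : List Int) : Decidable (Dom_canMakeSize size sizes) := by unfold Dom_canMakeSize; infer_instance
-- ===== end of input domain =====

-- B memoizes A's recurrence (top-down DP with an explicit memo dict), so each remainder is solved at most once (objective: alternative).

-- ===== PORT A =====
-- A's recursion does not structurally terminate for arbitrary Int coins, so it is written with
-- fuel; under Pre_ every recursive call decreases size by at least 1, so fuel size.toNat + 1 is
-- never exhausted and the port is exact on Pre_.
def canMakeSizeFuel (fuel : Nat) (size : Int) (sizes : List Int) : Bool :=
  match fuel with
  | 0 => false
  | Nat.succ f =>
    if size < 1 then false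
    else if sizes.contains 1 then true
    else sizes.any (fun s =>
      s == size || PySem.Int.mod size s == 0 || canMakeSizeFuel f (size - s) sizes)

def canMakeSize (size : Int) (sizes : List Int) : Bool :=
  canMakeSizeFuel (size.toNat + 1) size sizes

-- ===== PORT B =====
-- B is A's recurrence memoized: the memo dict is threaded through explicitly (Python mutates a
-- closure dict); the divisibility test over all coins is checked before any recursive descent.
-- The recursion is written with fuel; every recursive call is guarded by 1 ≤ s, so it decreases
-- n by at least 1 and fuel size.toNat + 1 is never exhausted (on any input).
mutual
def altGo (fuel : Nat) (n : Int) (sizes : List Int) (memo : PySem.Dict Int Bool) :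
    Bool × PySem.Dict Int Bool :=
  match fuel with
  | 0 => (false, memo)
  | Nat.succ f =>
    if n < 1 then (false, memo)
    else
      match memo.get? n with
      | some v => (v, memo)
      | none =>
        if sizes.any (fun s => decide (1 ≤ s) && (s == n || PySem.Int.mod n s == 0)) then
          (true, memo.insert n true)
        else
          let r := altGoList f n sizes sizes memo
          (r.1, r.2.insert n r.1)
termination_by (fuel, 0)

def altGoList (f : Nat) (n : Int) (rest : List Int) (sizes : List Int)
    (memo : PySem.Dict Int Bool) : Bool × PySem.Dict Int Bool :=
  match rest with
  | [] => (false, memo)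
  | s :: rest' =>
    if 1 ≤ s then
      let r := altGo f (n - s) sizes memo
      if r.1 then (true, r.2) else altGoList f n rest' sizes r.2
    else altGoList f n rest' sizes memo
termination_by (f, rest.length + 1)
end

def canMakeSize_alt (size : Int) (sizes : List Int) : Bool :=
  (altGo (size.toNat + 1) size sizes PySem.Dict.empty).1

-- ===== PRECONDITION & SPEC =====
-- Pre_ excludes only the inputs outside the function's natural domain (sizes are lengths of
-- strings, hence ≥ 1) on which A's loop is actually reached: there a 0 in sizes can make A raise
-- ZeroDivisionError, and a negative entry can make it recurse without bound (RecursionError) or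
-- return True via an accidental negative-divisor hit; when size < 1 or 1 ∈ sizes, A answers
-- before touching the entries, so those inputs are kept for every sizes list.
def Pre_canMakeSize (size : Int) (sizes : List Int) : Prop :=
  size < 1 ∨ 1 ∈ sizes ∨ ∀ s ∈ sizes, 1 ≤ s
instance (size : Int) (sizes : List Int) : Decidable (Pre_canMakeSize size sizes) := by
  unfold Pre_canMakeSize; infer_instance
def pvWitness_canMakeSize : Int × List Int := (7, [2, 3])

def Spec_canMakeSize (size : Int) (sizes : List Int) (out : Bool) : Prop := out = canMakeSize_alt size sizes
instance (size : Int) (sizes : List Int) (out : Bool) : Decidable (Spec_canMakeSize size sizes out) := by unfold Spec_canMakeSize; infer_instance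

-- ===== CLAIM (what is proved, stated in full; the proofs are below) =====
def Claim_equal_canMakeSize : Prop := ∀ (size : Int) (sizes : List Int), Dom_canMakeSize size sizes → Pre_canMakeSize size sizes → Spec_canMakeSize size sizes (canMakeSize size sizes)

-- ===== LEMMAS AND PROOFS =====

-- n is a nonempty sum of elements of sizes that are ≥ 1
def GoodP (sizes : List Int) (n : Int) : Prop :=
  ∃ l : List Int, l ≠ [] ∧ (∀ x ∈ l, x ∈ sizes ∧ 1 ≤ x) ∧ l.sum = n

theorem sum_ge_len (l : List Int) (h : ∀ x ∈ l, 1 ≤ x) : (l.length : Int) ≤ l.sum := by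
  induction l with
  | nil => simp
  | cons x t ih =>
    have hx := h x (by simp)
    have ht := ih (fun y hy => h y (by simp [hy]))
    simp only [List.length_cons, List.sum_cons]
    push_cast
    omega

theorem goodUnfold (sizes : List Int) (n : Int) (h1 : 1 ≤ n) :
    GoodP sizes n ↔
      (∃ s ∈ sizes, 1 ≤ s ∧ (s = n ∨ s ∣ n)) ∨
      (∃ s ∈ sizes, 1 ≤ s ∧ (1 ≤ n - s ∧ GoodP sizes (n - s))) := by
  constructor
  · rintro ⟨l, hne, hmem, hsum⟩
    match l, hne with
    | x :: rest, _ =>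
      have hx := hmem x (by simp)
      cases rest with
      | nil =>
        left
        refine ⟨x, hx.1, hx.2, Or.inl ?_⟩
        simpa using hsum
      | cons y t =>
        right
        have hrest : ∀ z ∈ y :: t, z ∈ sizes ∧ 1 ≤ z := fun z hz => hmem z (List.mem_cons_of_mem x hz)
        have hlen := sum_ge_len (y :: t) (fun z hz => (hrest z hz).2)
        have hsum' : (y :: t).sum = n - x := by
          simp only [List.sum_cons] at hsum ⊢; omega
        refine ⟨x, hx.1, hx.2, ?_, ⟨y :: t, by simp, hrest, hsum'⟩⟩
        rw [hsum'] at hlen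
        simp only [List.length_cons] at hlen
        push_cast at hlen; omega
  · rintro (⟨s, hsm, hs1, heq | hdvd⟩ | ⟨s, hsm, hs1, h1x, l, hne, hmem, hsum⟩)
    · exact ⟨[s], by simp, by simp [hsm]; omega, by simp [heq]⟩
    · obtain ⟨c, hc⟩ := hdvd
      have hc1 : 1 ≤ c := by nlinarith
      refine ⟨List.replicate c.toNat s, ?_, ?_, ?_⟩
      · simp only [ne_eq, List.replicate_eq_nil_iff]; omega
      · intro x hx
        rw [List.mem_replicate] at hx
        rw [hx.2]; exact ⟨hsm, hs1⟩
      · rw [List.sum_replicate, nsmul_eq_mul, Int.toNat_of_nonneg (by omega), mul_comm]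
        exact hc.symm
    · refine ⟨s :: l, by simp, ?_, by simp [hsum]⟩
      intro x hx
      rcases List.mem_cons.mp hx with rfl | hx
      · exact ⟨hsm, hs1⟩
      · exact hmem x hx

-- every settled memo entry records the truth of GoodP
def InvM (sizes : List Int) (memo : PySem.Dict Int Bool) : Prop :=
  ∀ k v, memo.get? k = some v → (v = true ↔ (1 ≤ k ∧ GoodP sizes k))

theorem invM_insert (sizes : List Int) (memo : PySem.Dict Int Bool) (n : Int) (b : Bool)
    (hI : InvM sizes memo) (hb : b = true ↔ (1 ≤ n ∧ GoodP sizes n)) :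
    InvM sizes (memo.insert n b) := by
  intro k v hk
  by_cases hkn : k = n
  · subst hkn
    rw [PySem.Dict.get?_insert_self] at hk
    cases hk
    exact hb
  · rw [PySem.Dict.get?_insert] at hk
    simp only [if_neg hkn] at hk
    exact hI k v hk

theorem goMain (sizes : List Int) :
    ∀ fuel : Nat, ∀ n : Int, n < (fuel : Int) → ∀ memo, InvM sizes memo →
      InvM sizes (altGo fuel n sizes memo).2 ∧
      ((altGo fuel n sizes memo).1 = true ↔ (1 ≤ n ∧ GoodP sizes n)) := by
  intro fuel
  induction fuel with
  | zero =>
    intro n hn memo hI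
    simp only [altGo]
    refine ⟨hI, ?_⟩
    simp only [Bool.false_eq_true, false_iff]
    rintro ⟨h1, -⟩
    simp at hn; omega
  | succ f ihf =>
    -- the inner loop over the remaining coins
    have listMain : ∀ rest : List Int, (∀ x ∈ rest, x ∈ sizes) →
        ∀ n : Int, n ≤ (f : Int) → ∀ memo, InvM sizes memo →
        InvM sizes (altGoList f n rest sizes memo).2 ∧
        ((altGoList f n rest sizes memo).1 = true ↔
          ∃ s ∈ rest, 1 ≤ s ∧ (1 ≤ n - s ∧ GoodP sizes (n - s))) := by
      intro rest
      induction rest with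
      | nil =>
        intro _ n hn memo hI
        simp only [altGoList]
        refine ⟨hI, ?_⟩
        simp
      | cons s rest' ih =>
        intro hsub n hn memo hI
        have hsub' : ∀ x ∈ rest', x ∈ sizes := fun x hx => hsub x (List.mem_cons_of_mem s hx)
        by_cases hs1 : 1 ≤ s
        · have hrec := ihf (n - s) (by omega) memo hI
          simp only [altGoList, if_pos hs1]
          by_cases hr : (altGo f (n - s) sizes memo).1 = true
          · rw [if_pos hr]
            refine ⟨hrec.1, ?_⟩
            simp only [true_iff]
            exact ⟨s, by simp, hs1, hrec.2.mp hr⟩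
          · rw [if_neg hr]
            have hrest := ih hsub' n hn _ hrec.1
            refine ⟨hrest.1, ?_⟩
            rw [hrest.2]
            constructor
            · rintro ⟨t, ht, h⟩
              exact ⟨t, List.mem_cons_of_mem s ht, h⟩
            · rintro ⟨t, ht, h1t, h⟩
              rcases List.mem_cons.mp ht with rfl | ht
              · exact absurd (hrec.2.mpr ⟨h.1, h.2⟩) hr
              · exact ⟨t, ht, h1t, h⟩
        · simp only [altGoList, if_neg hs1]
          have hrest := ih hsub' n hn memo hI
          refine ⟨hrest.1, ?_⟩
          rw [hrest.2]
          constructor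
          · rintro ⟨t, ht, h⟩
            exact ⟨t, List.mem_cons_of_mem s ht, h⟩
          · rintro ⟨t, ht, h1t, h⟩
            rcases List.mem_cons.mp ht with rfl | ht
            · exact absurd h1t hs1
            · exact ⟨t, ht, h1t, h⟩
    intro n hn memo hI
    simp only [altGo]
    by_cases h1 : n < 1
    · simp only [if_pos h1]
      refine ⟨hI, ?_⟩
      simp only [Bool.false_eq_true, false_iff]
      rintro ⟨h1', -⟩; omega
    · simp only [if_neg h1]
      have h1' : 1 ≤ n := by omega
      cases hmv : memo.get? n with
      | some v => exact ⟨hI, hI n v hmv⟩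
      | none =>
        have hanyIff : (sizes.any (fun s => decide (1 ≤ s) && (s == n || PySem.Int.mod n s == 0)) = true)
            ↔ ∃ s ∈ sizes, 1 ≤ s ∧ (s = n ∨ s ∣ n) := by
          rw [List.any_eq_true]
          constructor
          · rintro ⟨s, hsm, hb⟩
            simp only [Bool.and_eq_true, decide_eq_true_eq, Bool.or_eq_true, beq_iff_eq] at hb
            exact ⟨s, hsm, hb.1, hb.2.imp id (fun h => (PySem.Int.mod_eq_zero_iff_dvd n s).mp h)⟩
          · rintro ⟨s, hsm, hs1, h⟩
            refine ⟨s, hsm, ?_⟩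
            simp only [Bool.and_eq_true, decide_eq_true_eq, Bool.or_eq_true, beq_iff_eq]
            exact ⟨hs1, h.imp id (fun h => (PySem.Int.mod_eq_zero_iff_dvd n s).mpr h)⟩
        by_cases hany : sizes.any (fun s => decide (1 ≤ s) && (s == n || PySem.Int.mod n s == 0)) = true
        · simp only [if_pos hany]
          have hg : GoodP sizes n := (goodUnfold sizes n h1').mpr (Or.inl (hanyIff.mp hany))
          exact ⟨invM_insert sizes memo n true hI (by simp [h1', hg]), by simp [h1', hg]⟩
        · simp only [if_neg hany]
          have hlist := listMain sizes (fun x hx => hx) n (by push_cast at hn; omega) memo hI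
          have hres : (altGoList f n sizes sizes memo).1 = true ↔ (1 ≤ n ∧ GoodP sizes n) := by
            rw [hlist.2, goodUnfold sizes n h1']
            constructor
            · rintro ⟨s, hsm, hs1, h⟩
              exact ⟨h1', Or.inr ⟨s, hsm, hs1, h⟩⟩
            · rintro ⟨-, hg | ⟨s, hsm, hs1, h⟩⟩
              · exact absurd (hanyIff.mpr hg) hany
              · exact ⟨s, hsm, hs1, h⟩
          exact ⟨invM_insert sizes _ n _ hlist.1 hres, hres⟩

theorem invM_empty (sizes : List Int) : InvM sizes PySem.Dict.empty := by
  intro k v hk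
  rw [PySem.Dict.get?_empty] at hk
  cases hk

theorem fuelChar (sizes : List Int) (hpre : ∀ s ∈ sizes, 1 ≤ s) :
    ∀ (fuel : Nat) (size : Int), size < (fuel : Int) →
      (canMakeSizeFuel fuel size sizes = true ↔ 1 ≤ size ∧ GoodP sizes size) := by
  intro fuel
  induction fuel with
  | zero =>
    intro size hsz
    simp only [canMakeSizeFuel, Bool.false_eq_true, false_iff]
    rintro ⟨h1, -⟩
    simp at hsz; omega
  | succ f ih =>
    intro size hsz
    have hszf : ∀ s : Int, 1 ≤ s → size - s < (f : Int) := by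
      intro s hs; push_cast at hsz; omega
    rw [canMakeSizeFuel]
    by_cases hlt : size < 1
    · simp only [if_pos hlt, Bool.false_eq_true, false_iff]
      rintro ⟨h1, -⟩; omega
    · rw [if_neg hlt]
      have h1 : 1 ≤ size := by omega
      by_cases hone : sizes.contains 1
      · rw [if_pos hone]
        have h1m : (1 : Int) ∈ sizes := by simpa using hone
        simp only [true_iff]
        refine ⟨h1, List.replicate size.toNat 1, ?_, ?_, ?_⟩
        · simp only [ne_eq, List.replicate_eq_nil_iff]; omega
        · intro x hx
          rw [List.mem_replicate] at hx
          rw [hx.2]; exact ⟨h1m, le_refl 1⟩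
        · rw [List.sum_replicate, nsmul_eq_mul, mul_one, Int.toNat_of_nonneg (by omega)]
      · rw [if_neg hone, List.any_eq_true]
        constructor
        · rintro ⟨s, hsmem, hb⟩
          have hs1 : 1 ≤ s := hpre s hsmem
          simp only [Bool.or_eq_true, beq_iff_eq] at hb
          rcases hb with (heq | hmod) | hrec
          · exact ⟨h1, [s], by simp, by simp [hsmem]; omega, by simp [heq]⟩
          · have hdvd : s ∣ size := (PySem.Int.mod_eq_zero_iff_dvd size s).mp hmod
            obtain ⟨c, hc⟩ := hdvd
            have hc1 : 1 ≤ c := by nlinarith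
            refine ⟨h1, List.replicate c.toNat s, ?_, ?_, ?_⟩
            · simp only [ne_eq, List.replicate_eq_nil_iff]; omega
            · intro x hx
              rw [List.mem_replicate] at hx
              rw [hx.2]; exact ⟨hsmem, hs1⟩
            · rw [List.sum_replicate, nsmul_eq_mul, Int.toNat_of_nonneg (by omega), mul_comm]
              exact hc.symm
          · obtain ⟨h1', l, hne, hmem, hsum⟩ := (ih (size - s) (hszf s hs1)).mp hrec
            refine ⟨h1, s :: l, by simp, ?_, by simp [hsum]⟩
            intro x hx
            rcases List.mem_cons.mp hx with rfl | hx
            · exact ⟨hsmem, hs1⟩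
            · exact hmem x hx
        · rintro ⟨h1', l, hne, hmem, hsum⟩
          match l, hne with
          | x :: rest, _ =>
            have hx := hmem x (by simp)
            refine ⟨x, hx.1, ?_⟩
            simp only [Bool.or_eq_true, beq_iff_eq]
            cases rest with
            | nil =>
              left; left
              simpa using hsum
            | cons y t =>
              right
              have hrest : ∀ z ∈ y :: t, z ∈ sizes ∧ 1 ≤ z := fun z hz => hmem z (List.mem_cons_of_mem x hz)
              have hlen := sum_ge_len (y :: t) (fun z hz => (hrest z hz).2)
              have hsum' : (y :: t).sum = size - x := by
                simp only [List.sum_cons] at hsum ⊢; omega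
              have h1x : 1 ≤ size - x := by
                rw [hsum'] at hlen
                simp only [List.length_cons] at hlen
                push_cast at hlen; omega
              exact (ih (size - x) (hszf x hx.2)).mpr ⟨h1x, ⟨y :: t, by simp, hrest, hsum'⟩⟩

theorem altChar (size : Int) (sizes : List Int) :
    canMakeSize_alt size sizes = true ↔ 1 ≤ size ∧ GoodP sizes size := by
  have h := goMain sizes (size.toNat + 1) size
    (by have := Int.self_le_toNat size; push_cast; omega) PySem.Dict.empty (invM_empty sizes)
  exact h.2

-- ===== VERDICT (by name: the statement is the Claim_ definition above) =====
theorem canMakeSize_spec : Claim_equal_canMakeSize := by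
  intro size sizes _ hpre
  show canMakeSize size sizes = canMakeSize_alt size sizes
  by_cases hneg : size < 1
  · have hA : canMakeSize size sizes = false := by
      simp [canMakeSize, canMakeSizeFuel, hneg]
    have hB : canMakeSize_alt size sizes = false := by
      rw [← Bool.not_eq_true, altChar]
      rintro ⟨h1, -⟩; omega
    rw [hA, hB]
  · have h1 : 1 ≤ size := by omega
    by_cases hone : (1 : Int) ∈ sizes
    · have hA : canMakeSize size sizes = true := by
        rw [canMakeSize, canMakeSizeFuel, if_neg hneg, if_pos (by simpa using hone)]
      have hB : canMakeSize_alt size sizes = true := by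
        rw [altChar]
        refine ⟨h1, List.replicate size.toNat 1, ?_, ?_, ?_⟩
        · simp only [ne_eq, List.replicate_eq_nil_iff]; omega
        · intro x hx
          rw [List.mem_replicate] at hx
          rw [hx.2]; exact ⟨hone, le_refl 1⟩
        · rw [List.sum_replicate, nsmul_eq_mul, mul_one, Int.toNat_of_nonneg (by omega)]
      rw [hA, hB]
    · have hall : ∀ s ∈ sizes, 1 ≤ s := by
        rcases hpre with h | h | h
        · omega
        · exact absurd h hone
        · exact h
      have hfuel : size < ((size.toNat + 1 : Nat) : Int) := by
        have := Int.self_le_toNat size; push_cast; omega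
      rw [Bool.eq_iff_iff, canMakeSize, fuelChar sizes hall _ size hfuel, altChar]
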